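-- pv_equiv track=rewrite | github.com/Bryand701/Digital_Portfolio | Python/Universidad 2019/Tarea 4.py | agrupar_for
-- ===== SOURCE A (Python) =====
-- def agrupar_for (lista):
--
--     lista_final = []
--
--     for x in lista:
--         r = ""
--         est = str (x)
--
--         for y in est:
--             c = est.count(y)
--             if y not in r:
--                 while c != 0:
--
--                    r = r + y
--                    c -= 1
--
--         lista_final.append(int(r))
--     return lista_final
-- ===== SOURCE B (Python) =====
-- def agrupar_for(lista):
--     lista_final = []
--     for x in lista:
--         s = str(x)
--         lista_final.append(int(''.join(sorted(s, key=s.index))))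
--     return lista_final
-- ===== Notes on version B (the rewrite author's own statement) =====
-- stated objective: idiomatic
-- what changed: Replaces A's count-each-digit-and-rebuild scan (membership test on the growing result plus est.count and a hand-written while loop per character) with a single stable sort of the digit string keyed on each character's first-occurrence index (sorted(s, key=s.index)), which clusters equal digits while keeping groups in first-appearance order.
import Mathlib
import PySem

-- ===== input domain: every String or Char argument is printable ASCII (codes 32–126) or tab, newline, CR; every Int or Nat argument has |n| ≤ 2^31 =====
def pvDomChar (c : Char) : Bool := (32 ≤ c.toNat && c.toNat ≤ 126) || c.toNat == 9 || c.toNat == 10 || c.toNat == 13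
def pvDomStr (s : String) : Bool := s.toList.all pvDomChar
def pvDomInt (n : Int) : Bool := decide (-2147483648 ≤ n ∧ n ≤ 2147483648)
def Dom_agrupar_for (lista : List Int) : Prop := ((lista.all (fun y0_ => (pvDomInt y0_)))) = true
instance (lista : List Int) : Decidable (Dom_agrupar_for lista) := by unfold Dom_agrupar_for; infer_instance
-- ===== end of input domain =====

-- B replaces A's per-character count-and-rebuild scan with a stable sort of the digit
-- string keyed on each character's first-occurrence index (idiomatic sorted(s, key=s.index)).


-- ===== PORT A =====
-- 'while c != 0: r = r + y; c -= 1' as structural recursion on the counter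
-- (c = est.count(y) is a nonnegative count, so a Nat).
def pvWhileA (r : List Char) (y : Char) : Nat → List Char
  | 0 => r
  | Nat.succ c => pvWhileA (r ++ [y]) y c

-- 'y not in r' / 'est.count(y)' on a single character are char membership / char count.
-- int(r) is ported in the total form (PySem.Int.ofChars? r).getD 0; both ports apply
-- this same form to their built digit list, so the claim does not depend on the default.
def agrupar_for (lista : List Int) : List Int :=
  lista.foldl (fun lista_final x =>
    let est := PySem.Int.toChars x
    let r := est.foldl (fun r y =>
      let c := est.count y
      if r.contains y then r else pvWhileA r y c) []
    lista_final ++ [(PySem.Int.ofChars? r).getD 0]) []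

-- ===== PORT B =====
-- sorted(s, key=s.index): s.index(y) never raises here (y is drawn from s), so it is
-- ported in the total form (PySem.List.index? s y).getD 0.
def agrupar_for_alt (lista : List Int) : List Int :=
  lista.foldl (fun lista_final x =>
    let s := PySem.Int.toChars x
    let r := PySem.List.sorted s (fun y => (PySem.List.index? s y).getD 0) false
    lista_final ++ [(PySem.Int.ofChars? r).getD 0]) []

-- ===== PRECONDITION & SPEC =====
def Spec_agrupar_for (lista : List Int) (out : List Int) : Prop := out = agrupar_for_alt lista
instance (lista : List Int) (out : List Int) : Decidable (Spec_agrupar_for lista out) := by unfold Spec_agrupar_for; infer_instance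

-- ===== CLAIM (what is proved, stated in full; the proofs are below) =====
def Claim_equal_agrupar_for : Prop := ∀ (lista : List Int), Dom_agrupar_for lista → Spec_agrupar_for lista (agrupar_for lista)

-- ===== LEMMAS AND PROOFS =====

-- the first-occurrence key used by B (total form of s.index)
def pvKey (s : List Char) (c : Char) : Nat := (PySem.List.index? s c).getD 0

-- the grouped form both sides reduce to
def pvGrouped (s : List Char) : List Char :=
  (PySem.Set.ofList s).flatMap (fun a => List.replicate (s.count a) a)

-- ---- A-side: A's inner fold builds pvGrouped ----
theorem pvWhileA_eq (y : Char) (c : Nat) : ∀ r, pvWhileA r y c = r ++ List.replicate c y := by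
  induction c with
  | zero => intro r; simp [pvWhileA]
  | succ c ih => intro r; simp [pvWhileA, ih, List.replicate_succ]

theorem memFlat (s seen : List Char) (hs : ∀ c ∈ seen, c ∈ s) (c : Char) :
    c ∈ seen.flatMap (fun a => List.replicate (s.count a) a) ↔ c ∈ seen := by
  simp only [List.mem_flatMap, List.mem_replicate]
  constructor
  · rintro ⟨a, ha, -, rfl⟩; exact ha
  · intro hc
    exact ⟨c, hc, Nat.pos_iff_ne_zero.mp (List.count_pos_iff.mpr (hs c hc)), rfl⟩

theorem foldA_eq (s : List Char) : ∀ (t seen : List Char),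
    (∀ c ∈ t, c ∈ s) → (∀ c ∈ seen, c ∈ s) →
    t.foldl (fun r y => let c := s.count y; if r.contains y then r else pvWhileA r y c)
      (seen.flatMap (fun a => List.replicate (s.count a) a))
    = (t.foldl PySem.Set.add seen).flatMap (fun a => List.replicate (s.count a) a) := by
  intro t
  induction t with
  | nil => intro seen _ _; rfl
  | cons y t ih =>
    intro seen ht hseen
    have hy : y ∈ s := ht y (List.mem_cons_self ..)
    simp only [List.foldl_cons]
    by_cases hmem : y ∈ seen
    · have hc : (seen.flatMap (fun a => List.replicate (s.count a) a)).contains y = true := by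
        simpa [List.contains_iff_mem, memFlat s seen hseen] using hmem
      have hadd : PySem.Set.add seen y = seen := by
        simp [PySem.Set.add, PySem.Set.contains, hmem]
      simp only [hc, if_true, hadd]
      exact ih seen (fun c hc' => ht c (List.mem_cons_of_mem _ hc')) hseen
    · have hc : (seen.flatMap (fun a => List.replicate (s.count a) a)).contains y = false := by
        simpa [List.contains_iff_mem, memFlat s seen hseen] using hmem
      have hadd : PySem.Set.add seen y = seen ++ [y] := by
        simp [PySem.Set.add, PySem.Set.contains, hmem]
      simp only [hc, if_false, Bool.false_eq_true, hadd]
      rw [pvWhileA_eq]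
      have hflat : seen.flatMap (fun a => List.replicate (s.count a) a) ++ List.replicate (s.count y) y
          = (seen ++ [y]).flatMap (fun a => List.replicate (s.count a) a) := by
        simp
      rw [hflat]
      exact ih (seen ++ [y]) (fun c hc' => ht c (List.mem_cons_of_mem _ hc'))
        (by intro c hc'; rcases List.mem_append.mp hc' with h | h
            · exact hseen c h
            · simpa using (List.mem_singleton.mp h) ▸ hy)

theorem innerA_eq (s : List Char) :
    s.foldl (fun r y => let c := s.count y; if r.contains y then r else pvWhileA r y c) []
    = pvGrouped s := by
  have hA := foldA_eq s s [] (fun c hc => hc) (by simp)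
  simp only [List.flatMap_nil] at hA
  rw [hA, pvGrouped, show s.foldl PySem.Set.add [] = PySem.Set.ofList s from (PySem.Set.ofList_eq_foldl s).symm]

-- ---- B-side: the stable sort by first-occurrence index builds pvGrouped ----

-- the key of a member is its first index, with the witnessing getElem facts
theorem pvKey_spec (s : List Char) (a : Char) (ha : a ∈ s) :
    ∃ hk : pvKey s a < s.length, s[pvKey s a] = a ∧ ∀ j (hj : j < pvKey s a), s[j] ≠ a := by
  obtain ⟨k, hk⟩ := Option.isSome_iff_exists.mp ((PySem.List.index?_isSome_iff s a).mpr ha)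
  have h2 := PySem.List.getElem_of_index?_eq_some hk
  have hkey : pvKey s a = k := by simp only [pvKey]; rw [hk]; rfl
  subst hkey
  exact h2

-- key is injective on members of s
theorem pvKey_inj (s : List Char) (a b : Char) (ha : a ∈ s) (hb : b ∈ s)
    (h : pvKey s a = pvKey s b) : a = b := by
  obtain ⟨hka, hga, -⟩ := pvKey_spec s a ha
  obtain ⟨hkb, hgb, -⟩ := pvKey_spec s b hb
  rw [← hga, ← hgb]
  congr 1

-- keys strictly increase along the ordered set of first occurrences
theorem foldl_add_pairwise (s : List Char) : ∀ (t pre acc : List Char),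
    s = pre ++ t → (∀ a, a ∈ acc ↔ a ∈ pre) → acc.Pairwise (fun a b => pvKey s a < pvKey s b) →
    (t.foldl PySem.Set.add acc).Pairwise (fun a b => pvKey s a < pvKey s b) := by
  intro t
  induction t with
  | nil => intro pre acc _ _ hp; exact hp
  | cons y t ih =>
    intro pre acc hs hmem hp
    simp only [List.foldl_cons]
    by_cases hy : y ∈ acc
    · have hadd : PySem.Set.add acc y = acc := by
        simp [PySem.Set.add, PySem.Set.contains, hy]
      rw [hadd]
      refine ih (pre ++ [y]) acc (by simp [hs]) (fun a => ?_) hp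
      rw [hmem a]
      constructor
      · intro h; exact List.mem_append.mpr (Or.inl h)
      · intro h; rcases List.mem_append.mp h with h | h
        · exact h
        · exact (List.mem_singleton.mp h) ▸ ((hmem y).mp hy)
    · have hadd : PySem.Set.add acc y = acc ++ [y] := by
        simp [PySem.Set.add, PySem.Set.contains, hy]
      rw [hadd]
      have hynp : y ∉ pre := fun h => hy ((hmem y).mpr h)
      have hkey : pvKey s y = pre.length := by
        have : PySem.List.index? s y = some pre.length :=
          (PySem.List.index?_eq_some_iff s y pre.length).mpr ⟨pre, t, hs, rfl, hynp⟩
        simp only [pvKey]; rw [this]; rfl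
      have hlt : ∀ a ∈ acc, pvKey s a < pre.length := by
        intro a ha
        have hap : a ∈ pre := (hmem a).mp ha
        have h1 : PySem.List.index? s a = PySem.List.index? pre a := by
          rw [hs]; exact PySem.List.index?_append_of_mem (y :: t) hap
        obtain ⟨k, hk⟩ := Option.isSome_iff_exists.mp ((PySem.List.index?_isSome_iff pre a).mpr hap)
        obtain ⟨hklt, -, -⟩ := PySem.List.getElem_of_index?_eq_some hk
        have : pvKey s a = k := by simp only [pvKey]; rw [h1, hk]; rfl
        rw [this]; exact hklt
      refine ih (pre ++ [y]) (acc ++ [y]) (by simp [hs]) (fun a => ?_) ?_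
      · simp only [List.mem_append, List.mem_singleton]
        rw [hmem a]
      · rw [List.pairwise_append]
        refine ⟨hp, List.pairwise_singleton _ _, ?_⟩
        intro a ha b hb
        rw [List.mem_singleton.mp hb, hkey]
        exact hlt a ha

theorem ofList_key_pairwise (s : List Char) :
    (PySem.Set.ofList s).Pairwise (fun a b => pvKey s a < pvKey s b) := by
  rw [PySem.Set.ofList_eq_foldl]
  exact foldl_add_pairwise s s [] [] rfl (by simp) (by simp)

-- pvGrouped is a permutation of s
theorem count_flat (s : List Char) : ∀ (l : List Char), l.Nodup → ∀ c,
    (l.flatMap (fun a => List.replicate (s.count a) a)).count c = if c ∈ l then s.count c else 0 := by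
  intro l
  induction l with
  | nil => simp
  | cons a l ih =>
    intro hnd c
    simp only [List.flatMap_cons, List.count_append, List.count_replicate]
    rw [ih hnd.of_cons c]
    by_cases hca : c = a
    · subst hca
      simp [(List.nodup_cons.mp hnd).1]
    · simp [hca, Ne.symm hca]

theorem grouped_perm (s : List Char) : (pvGrouped s).Perm s := by
  rw [List.perm_iff_count]
  intro c
  rw [pvGrouped, count_flat s _ (PySem.Set.nodup_ofList s) c]
  by_cases hc : c ∈ s
  · simp [PySem.Set.mem_ofList, hc]
  · simp [PySem.Set.mem_ofList, hc, List.count_eq_zero_of_not_mem hc]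

-- pvGrouped is nondecreasing in the key
theorem grouped_pairwise (s : List Char) :
    (pvGrouped s).Pairwise (fun a b => pvKey s a ≤ pvKey s b) := by
  rw [pvGrouped]
  refine List.pairwise_flatMap.mpr ⟨?_, ?_⟩
  · intro a _
    exact List.pairwise_replicate.mpr (Or.inr (le_refl _))
  · refine List.Pairwise.imp_of_mem ?_ (ofList_key_pairwise s)
    intro a b _ _ hab x hx y hy
    rw [List.eq_of_mem_replicate hx, List.eq_of_mem_replicate hy]
    exact le_of_lt hab

-- globally injective refinement of the key (Char codes are < 1114112)
def pvKey2 (s : List Char) (c : Char) : Nat := pvKey s c * 1114112 + c.toNat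

-- every Char code is below 0x110000 (from Char.valid)
theorem pvCharLt (c : Char) : c.toNat < 1114112 := by
  have := c.valid
  unfold Char.toNat
  rcases this with h | h <;> omega

theorem pvKey2_inj (s : List Char) : Function.Injective (pvKey2 s) := by
  intro a b h
  have ha : a.toNat < 1114112 := pvCharLt a
  have hb : b.toNat < 1114112 := pvCharLt b
  have heq : a.toNat = b.toNat := by
    unfold pvKey2 at h
    omega
  exact Char.ext (UInt32.toNat_inj.mp heq)

-- ≤ on keys of members transfers to ≤ on the injective key
theorem key2_le (s : List Char) (a b : Char) (ha : a ∈ s) (hb : b ∈ s)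
    (h : pvKey s a ≤ pvKey s b) : pvKey2 s a ≤ pvKey2 s b := by
  rcases lt_or_eq_of_le h with h | h
  · unfold pvKey2
    have := pvCharLt b
    have := pvCharLt a
    omega
  · rw [pvKey_inj s a b ha hb h]

theorem innerB_eq (s : List Char) :
    PySem.List.sorted s (fun y => (PySem.List.index? s y).getD 0) false = pvGrouped s := by
  have hmemL : ∀ c ∈ PySem.List.sorted s (fun y => pvKey s y) false, c ∈ s := by
    intro c hc; exact (PySem.List.mem_sorted ..).mp hc
  have hmemR : ∀ c ∈ pvGrouped s, c ∈ s := by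
    intro c hc
    rw [pvGrouped] at hc
    obtain ⟨a, ha, hc⟩ := List.mem_flatMap.mp hc
    rw [List.eq_of_mem_replicate hc]
    exact (PySem.Set.mem_ofList ..).mp ha
  have hperm : (PySem.List.sorted s (fun y => pvKey s y) false).Perm (pvGrouped s) :=
    (PySem.List.sorted_perm ..).trans (grouped_perm s).symm
  have h1 : (PySem.List.sorted s (fun y => pvKey s y) false).Pairwise
      (fun a b => pvKey2 s a ≤ pvKey2 s b) := by
    refine List.Pairwise.imp_of_mem ?_ (PySem.List.sorted_pairwise ..)
    intro a b ha hb h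
    exact key2_le s a b (hmemL a ha) (hmemL b hb) h
  have h2 : (pvGrouped s).Pairwise (fun a b => pvKey2 s a ≤ pvKey2 s b) := by
    refine List.Pairwise.imp_of_mem ?_ (grouped_pairwise s)
    intro a b ha hb h
    exact key2_le s a b (hmemR a ha) (hmemR b hb) h
  exact PySem.List.eq_of_perm_of_pairwise_le_of_injective (pvKey2 s) (pvKey2_inj s) hperm h1 h2

-- ===== VERDICT (by name: the statement is the Claim_ definition above) =====
theorem agrupar_for_spec : Claim_equal_agrupar_for := by
  intro lista _
  unfold Spec_agrupar_for
  simp only [agrupar_for, agrupar_for_alt]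
  rw [PySem.List.foldl_append_singleton_eq_map, PySem.List.foldl_append_singleton_eq_map]
  exact List.map_congr_left (fun x _ => by rw [innerA_eq, innerB_eq])
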